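-- pv_equiv track=rewrite | github.com/Kanika-Sodhi/All_Practice | allpractice/AtLeastKRepeating.py | maxCharcount
-- ===== SOURCE A (Python) =====
-- def maxCharcount(s, k):
--     num = list(s)
--     dictn = {}
--     maxval = 0
--     for i in range(len(num)):
--         dictn[num[i]] = 1 + dictn.get(num[i], 0)
--
--     for ind, value in dictn.items():
--         if value >= k:
--             maxval = max(value, maxval)
--
--     return maxval
-- ===== SOURCE B (Python) =====
-- def maxCharcount(s, k):
--     best = 0
--     run = 0
--     prev = None
--     for c in sorted(s):
--         if c == prev:
--             run += 1
--         else: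
--             if run >= k and run > best:
--                 best = run
--             run = 1
--             prev = c
--     if run >= k and run > best:
--         best = run
--     return best
-- ===== Notes on version B (the rewrite author's own statement) =====
-- stated objective: alternative
-- what changed: Replaces the hash-map frequency count plus item scan with sorting the characters and a single run-length pass over the sorted sequence, keeping a running maximum of run lengths that reach k.
import Mathlib
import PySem

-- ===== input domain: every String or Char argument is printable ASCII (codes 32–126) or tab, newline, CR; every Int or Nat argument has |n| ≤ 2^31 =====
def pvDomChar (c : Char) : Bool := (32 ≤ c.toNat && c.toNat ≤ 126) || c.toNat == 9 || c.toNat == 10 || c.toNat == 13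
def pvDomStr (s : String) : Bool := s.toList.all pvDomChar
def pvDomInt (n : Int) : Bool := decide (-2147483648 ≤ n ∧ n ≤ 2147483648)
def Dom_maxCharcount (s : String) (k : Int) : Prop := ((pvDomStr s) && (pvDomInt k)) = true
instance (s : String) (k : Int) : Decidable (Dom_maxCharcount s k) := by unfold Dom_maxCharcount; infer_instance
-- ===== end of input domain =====

-- B replaces A's hash-map counting + item scan with sort-then-run-length maximum (alternative algorithm, not claimed faster).

-- ===== PORT A =====
-- the loop 'for i in range(len(num)): dictn[num[i]] = 1 + dictn.get(num[i], 0)' walks the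
-- list elements in order; ported as a fold over the same elements with the same dict state
def maxCharcount (s : String) (k : Int) : Int :=
  let num := s.toList
  let dictn : PySem.Dict Char Int :=
    num.foldl (fun d c => d.insert c (1 + d.getD c 0)) PySem.Dict.empty
  dictn.items.foldl (fun maxval p => if p.2 ≥ k then max p.2 maxval else maxval) 0

-- ===== PORT B =====
-- the loop body of Source B: state (best, run, prev), final run closed after the loop
def altGo (k : Int) : List Char → Int → Int → Option Char → Int
  | [], best, run, _ => if run ≥ k ∧ run > best then run else best
  | c :: rest, best, run, prev =>
      if some c = prev then altGo k rest best (run + 1) prev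
      else altGo k rest (if run ≥ k ∧ run > best then run else best) 1 (some c)

def maxCharcount_alt (s : String) (k : Int) : Int :=
  altGo k (PySem.List.sorted s.toList (fun c => c) false) 0 0 none

-- ===== PRECONDITION & SPEC =====
def Spec_maxCharcount (s : String) (k : Int) (out : Int) : Prop := out = maxCharcount_alt s k
instance (s : String) (k : Int) (out : Int) : Decidable (Spec_maxCharcount s k out) := by unfold Spec_maxCharcount; infer_instance

-- ===== CLAIM (what is proved, stated in full; the proofs are below) =====
def Claim_equal_maxCharcount : Prop := ∀ (s : String) (k : Int), Dom_maxCharcount s k → Spec_maxCharcount s k (maxCharcount s k)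

-- ===== LEMMAS AND PROOFS =====

-- the closing step 'if run >= k and run > best: best = run'
def cstep (k b v : Int) : Int := if v ≥ k ∧ v > b then v else b

theorem cstep_eq_max (k b v : Int) : cstep k b v = if v ≥ k then max v b else b := by
  unfold cstep; split_ifs <;> omega

theorem cstep_lcomm (k b v w : Int) : cstep k (cstep k b v) w = cstep k (cstep k b w) v := by
  unfold cstep; split_ifs <;> omega

theorem foldl_cstep_perm {k b : Int} {l₁ l₂ : List Int} (h : l₁.Perm l₂) :
    l₁.foldl (cstep k) b = l₂.foldl (cstep k) b := by
  induction h generalizing b with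
  | nil => rfl
  | cons x _ ih => simp [List.foldl, ih]
  | swap x y l => simp [List.foldl, cstep_lcomm]
  | trans _ _ ih₁ ih₂ => rw [ih₁, ih₂]

-- in a ≤-sorted list every element past the leading block of c's is > c
theorem dropWhile_gt (c : Char) : ∀ (u : List Char), u.Pairwise (· ≤ ·) →
    (∀ x ∈ u, c ≤ x) → ∀ x ∈ u.dropWhile (· == c), c < x := by
  intro u
  induction u with
  | nil => intro _ _ x hx; simp [List.dropWhile] at hx
  | cons a v ih =>
    intro hp hle x hx
    rw [List.dropWhile] at hx
    by_cases hac : a = c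
    · subst hac
      simp at hx
      exact ih (List.Pairwise.sublist (List.sublist_cons_self a v) hp)
        (fun y hy => hle y (List.mem_cons_of_mem a hy)) x hx
    · have : (a == c) = false := by simp [hac]
      rw [this] at hx
      simp at hx
      have hca : c < a := lt_of_le_of_ne (hle a (List.mem_cons_self)) (fun h => hac h.symm)
      rcases hx with rfl | hx
      · exact hca
      · exact lt_of_lt_of_le hca ((List.pairwise_cons.mp hp).1 x hx)

theorem takeWhile_replicate (c : Char) (u : List Char) :
    u.takeWhile (· == c) = List.replicate (u.takeWhile (· == c)).length c := by
  apply List.eq_replicate_of_mem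
  intro x hx
  have := List.mem_takeWhile_imp hx
  simpa using this

-- consuming the rest of a run of c's with prev = c
theorem altGo_run (k : Int) (c : Char) : ∀ (m : ℕ) (t : List Char), (∀ x ∈ t, x ≠ c) →
    ∀ best run, altGo k (List.replicate m c ++ t) best run (some c) = altGo k t best (run + m) (some c) := by
  intro m
  induction m with
  | zero => intro t _ best run; simp [List.replicate]
  | succ n ih =>
    intro t ht best run
    rw [List.replicate_succ, List.cons_append, altGo, if_pos rfl, ih t ht best (run + 1)]
    have h : run + 1 + (n : Int) = run + ((n + 1 : ℕ) : Int) := by push_cast; ring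
    rw [h]

-- entering a fresh run of c's (prev ≠ c): close the old run, count the new one
theorem altGo_enter (k : Int) (c : Char) (m : ℕ) (hm : 1 ≤ m) (t : List Char)
    (ht : ∀ x ∈ t, x ≠ c) (best run : Int) (p : Option Char) (hp : p ≠ some c) :
    altGo k (List.replicate m c ++ t) best run p = altGo k t (cstep k best run) m (some c) := by
  obtain ⟨n, rfl⟩ : ∃ n, m = n + 1 := ⟨m - 1, by omega⟩
  rw [List.replicate_succ, List.cons_append, altGo]
  rw [if_neg (fun h => hp h.symm)]
  rw [altGo_run k c n t ht]
  show altGo k t (cstep k best run) (1 + n) (some c) = _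
  congr 1
  push_cast
  ring

theorem ofList_replicate_append (c : Char) (m : ℕ) (hm : 1 ≤ m) (t : List Char)
    (ht : ∀ x ∈ t, x ≠ c) :
    PySem.Set.ofList (List.replicate m c ++ t) = c :: PySem.Set.ofList t := by
  rw [PySem.Set.ofList_append]
  have h1 : PySem.Set.ofList (List.replicate m c) = [c] := by
    induction m with
    | zero => omega
    | succ n ih =>
      rw [List.replicate_succ, PySem.Set.ofList_cons]
      by_cases hn : n = 0
      · subst hn; simp [PySem.Set.ofList_nil, PySem.Set.discard]
      · rw [ih (by omega)]
        simp [PySem.Set.discard]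
  rw [h1, PySem.Set.update_eq_append_filter]
  have : (PySem.Set.ofList t).filter (fun y => !(PySem.Set.contains [c] y)) = PySem.Set.ofList t := by
    apply List.filter_eq_self.mpr
    intro x hx
    have hxne : x ≠ c := ht x ((PySem.Set.mem_ofList _ _).mp hx)
    simp [PySem.Set.contains, hxne]
  rw [this]
  rfl

theorem count_replicate_append_self (c : Char) (m : ℕ) (t : List Char) (ht : ∀ x ∈ t, x ≠ c) :
    (List.replicate m c ++ t).count c = m := by
  rw [List.count_append, List.count_replicate_self]
  have : t.count c = 0 := List.count_eq_zero.mpr (fun h => ht c h rfl)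
  omega

theorem count_replicate_append_other (c d : Char) (hdc : d ≠ c) (m : ℕ) (t : List Char) :
    (List.replicate m c ++ t).count d = t.count d := by
  have h0 : (List.replicate m c).count d = 0 :=
    List.count_eq_zero.mpr (fun hmem => hdc (List.eq_of_mem_replicate hmem))
  rw [List.count_append, h0]
  omega

-- MAIN: on a ≤-sorted list, the run-length loop computes the fold of cstep over the
-- multiplicities of the distinct characters
theorem altGo_sorted (k : Int) : ∀ (n : ℕ) (u : List Char), u.length ≤ n → u.Pairwise (· ≤ ·) →
    ∀ (best run : Int) (p : Option Char), (∀ q, p = some q → ∀ x ∈ u, q < x) →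
    altGo k u best run p =
      ((PySem.Set.ofList u).map (fun c => (u.count c : Int))).foldl (cstep k) (cstep k best run) := by
  intro n
  induction n with
  | zero =>
    intro u hu _ best run p _
    cases u with
    | nil => simp only [altGo, PySem.Set.ofList_nil, List.map_nil, List.foldl_nil, cstep]
    | cons a v => simp at hu
  | succ n ih =>
    intro u hu hsort best run p hp
    cases u with
    | nil => simp only [altGo, PySem.Set.ofList_nil, List.map_nil, List.foldl_nil, cstep]
    | cons c rest =>
      set u := c :: rest with hudef
      have hdecomp : u = u.takeWhile (· == c) ++ u.dropWhile (· == c) :=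
        (List.takeWhile_append_dropWhile).symm
      set m := (u.takeWhile (· == c)).length with hmdef
      set t := u.dropWhile (· == c) with htdef
      have hrepl : u.takeWhile (· == c) = List.replicate m c := takeWhile_replicate c u
      have hle : ∀ x ∈ u, c ≤ x := by
        intro x hx
        rcases List.mem_cons.mp hx with rfl | hx
        · exact le_refl x
        · exact (List.pairwise_cons.mp hsort).1 x hx
      have hgt : ∀ x ∈ t, c < x := dropWhile_gt c u hsort hle
      have hne : ∀ x ∈ t, x ≠ c := fun x hx => ne_of_gt (hgt x hx)
      have hm1 : 1 ≤ m := by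
        have : u.takeWhile (· == c) = c :: rest.takeWhile (· == c) := by
          rw [hudef, List.takeWhile_cons, if_pos (by simp)]
        rw [hmdef, this]
        simp
      have hu' : u = List.replicate m c ++ t := by rw [← hrepl]; exact hdecomp
      have htlen : t.length ≤ n := by
        have := congrArg List.length hu'
        simp at this
        omega
      have htsort : t.Pairwise (· ≤ ·) :=
        List.Pairwise.sublist (List.dropWhile_sublist (· == c)) hsort
      have hpere : p ≠ some c := by
        intro h
        subst h
        exact lt_irrefl c (hp c rfl c (by rw [hudef]; exact List.mem_cons_self))
      rw [hu', altGo_enter k c m hm1 t hne best run p hpere]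
      rw [ih t htlen htsort (cstep k best run) (m : Int) (some c)
        (fun q hq x hx => Option.some_inj.mp hq ▸ hgt x hx)]
      rw [ofList_replicate_append c m hm1 t hne]
      rw [List.map_cons, List.foldl_cons]
      rw [count_replicate_append_self c m t hne]
      congr 1
      apply List.map_congr_left
      intro d hd
      have hdne : d ≠ c := hne d ((PySem.Set.mem_ofList _ _).mp hd)
      rw [count_replicate_append_other c d hdne m t]

-- A's value as the same fold over the distinct characters in first-occurrence order
theorem maxCharcount_eq_fold (s : String) (k : Int) :
    maxCharcount s k =
      ((PySem.Set.ofList s.toList).map (fun c => ((s.toList.count c : ℕ) : Int))).foldl (cstep k) 0 := by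
  have key : maxCharcount s k =
      ((s.toList.foldl (fun d c => d.insert c (1 + d.getD c 0)) PySem.Dict.empty).items).foldl
        (fun maxval p => if p.2 ≥ k then max p.2 maxval else maxval) 0 := rfl
  rw [key]
  have hfun : (fun (d : PySem.Dict Char Int) (c : Char) => d.insert c (1 + d.getD c 0)) =
      (fun d c => d.insert c (d.getD c 0 + 1)) := by
    funext d c; rw [Int.add_comm]
  rw [hfun, PySem.Dict.foldl_insert_getD_add_one_eq_counter, PySem.Dict.items_counter]
  rw [List.foldl_map]
  conv_rhs => rw [List.foldl_map]
  apply PySem.List.foldl_congr_mem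
  intro b p _
  exact (cstep_eq_max k b _).symm

theorem maxCharcount_spec' (s : String) (k : Int) : maxCharcount s k = maxCharcount_alt s k := by
  rw [maxCharcount_eq_fold]
  unfold maxCharcount_alt
  set l := s.toList with hl
  set u := PySem.List.sorted l (fun c => c) false with husort
  have hsp : u.Pairwise (· ≤ ·) := by
    have := PySem.List.sorted_pairwise (xs := l) (key := fun c => c)
    simpa using this
  have hperm : u.Perm l := PySem.List.sorted_perm l (fun c => c) false
  rw [altGo_sorted k u.length u (le_refl _) hsp 0 0 none (fun q hq => nomatch hq)]
  have hz : cstep k 0 0 = 0 := by unfold cstep; split_ifs <;> omega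
  rw [hz]
  have hcount : (fun c => ((u.count c : ℕ) : Int)) = fun c => ((l.count c : ℕ) : Int) := by
    funext c; rw [hperm.count_eq]
  rw [hcount]
  have hsetperm : (PySem.Set.ofList u).Perm (PySem.Set.ofList l) := by
    rw [List.perm_ext_iff_of_nodup (PySem.Set.nodup_ofList u) (PySem.Set.nodup_ofList l)]
    intro a
    rw [PySem.Set.mem_ofList _ _, PySem.Set.mem_ofList _ _, hperm.mem_iff]
  exact foldl_cstep_perm (hsetperm.map _).symm

-- ===== VERDICT (by name: the statement is the Claim_ definition above) =====
theorem maxCharcount_spec : Claim_equal_maxCharcount := by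
  intro s k _
  unfold Spec_maxCharcount
  exact maxCharcount_spec' s k
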